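-- pv_equiv track=rewrite | github.com/JeanPhilipLalumiere/MCGT | tools/round3_rescue_v3d.py | scan_and_fill_all_blocks
-- ===== SOURCE A (Python) =====
-- OPENERS = ("def","class","if","elif","for","while","try","with","else","except","finally")
--
-- def indent_of(line:str)->int:
--     n=0
--     for ch in line:
--         if ch==" ": n+=1
--         elif ch=="\t": n+=4
--         else: break
--     return n
--
-- def next_nonblank(lines, j):
--     k=j+1
--     while k<len(lines) and (lines[k].strip()=="" or lines[k].lstrip().startswith("#")):
--         k+=1
--     return k if k<len(lines) else None
--
-- def ensure_block_after(lines, j):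
--     base=indent_of(lines[j])
--     k=next_nonblank(lines, j)
--     if k is None or indent_of(lines[k])<=base:
--         lines.insert(j+1, " "*(base+4) + "pass  # auto-rescue v3d: missing block\n")
--         return True
--     return False
--
-- def scan_and_fill_all_blocks(lines):
--     i=0; changed=False
--     while i < len(lines):
--         s=lines[i].strip()
--         if s.endswith(":"):
--             head=s.split(":",1)[0].strip().split()[0] if s.split(":",1)[0].strip() else ""
--             if head in OPENERS:
--                 if ensure_block_after(lines, i):
--                     changed=True
--         i+=1
--     return changed
-- ===== SOURCE B (Python) =====
-- OPENERS = ("def","class","if","elif","for","while","try","with","else","except","finally")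
--
-- def indent_of(line: str) -> int:
--     n = 0
--     for ch in line:
--         if ch == " ": n += 1
--         elif ch == "\t": n += 4
--         else: break
--     return n
--
-- def scan_and_fill_all_blocks(lines):
--     n = len(lines)
--     # backward pass: nxt[j] = indent of the first non-blank/non-comment line at index >= j, else None
--     nxt = [None] * (n + 1)
--     cur = None
--     for j in range(n - 1, -1, -1):
--         t = lines[j]
--         if not (t.strip() == "" or t.lstrip().startswith("#")):
--             cur = indent_of(t)
--         nxt[j] = cur
--     # single forward pass rebuilding the list
--     out = []
--     changed = False
--     for i, line in enumerate(lines):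
--         out.append(line)
--         s = line.strip()
--         if s.endswith(":"):
--             part = s.split(":", 1)[0].strip()
--             head = part.split()[0] if part else ""
--             if head in OPENERS:
--                 base = indent_of(line)
--                 k = nxt[i + 1]
--                 if k is None or k <= base:
--                     out.append(" " * (base + 4) + "pass  # auto-rescue v3d: missing block\n")
--                     changed = True
--     lines[:] = out
--     return changed
-- ===== Notes on version B (the rewrite author's own statement) =====
-- stated objective: alternative
-- what changed: A rescans forward for the next non-blank line at every opener and splices pass lines into the list it is iterating (list.insert is O(n)); B precomputes next-non-blank indents in one backward pass and then decides every opener in a single forward pass that rebuilds the list once.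
import Mathlib
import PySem

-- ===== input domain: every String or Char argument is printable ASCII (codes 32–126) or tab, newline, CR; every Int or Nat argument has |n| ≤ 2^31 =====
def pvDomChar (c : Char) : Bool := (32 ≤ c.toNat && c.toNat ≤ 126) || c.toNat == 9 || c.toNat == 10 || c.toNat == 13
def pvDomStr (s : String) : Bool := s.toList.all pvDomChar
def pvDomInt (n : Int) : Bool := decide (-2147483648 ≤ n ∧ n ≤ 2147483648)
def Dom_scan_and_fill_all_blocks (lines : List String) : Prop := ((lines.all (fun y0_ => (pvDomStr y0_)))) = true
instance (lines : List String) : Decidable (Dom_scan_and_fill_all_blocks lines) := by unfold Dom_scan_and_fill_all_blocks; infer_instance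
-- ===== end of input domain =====

-- B replaces A's in-place rescan (while-loop with list.insert and a forward next_nonblank rescan
-- per opener) by one backward precomputation of next-nonblank indents plus one forward pass; both
-- Pythons mutate `lines` identically in place, the Lean claim is about the returned Bool only.

-- ===== PORT A =====
-- helpers shared by Source A and Source B (identical code in both files)
def pvOpeners : List String :=
  ["def","class","if","elif","for","while","try","with","else","except","finally"]

def pvIndentGo : List Char → Int → Int
  | [], n => n
  | c :: rest, n =>
    if c = ' ' then pvIndentGo rest (n + 1)
    else if c = '\t' then pvIndentGo rest (n + 4)
    else n

-- indent_of: count leading spaces (1) and tabs (4), stop at the first other char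
def pvIndentOf (line : String) : Int := pvIndentGo line.toList 0

-- head = s.split(":",1)[0].strip().split()[0] if s.split(":",1)[0].strip() else ""
-- (split(sep,1) is never empty, and split() of a non-empty stripped string is never empty,
--  so the `headD ""` defaults are unreachable)
def pvHead (s : String) : String :=
  let p0 := ((PySem.Str.splitMax? s ":" 1).getD []).headD ""
  let t := PySem.Str.strip p0
  if t == "" then "" else (PySem.Str.split₀ t).headD ""

-- lines[k].strip()=="" or lines[k].lstrip().startswith("#")
def pvBlankOrComment (l : String) : Bool :=
  (PySem.Str.strip l == "") || PySem.Str.startswith (PySem.Str.lstrip l) "#"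

-- next_nonblank, zipper form: scan the suffix after the opener, return the line itself
-- (A only uses lines[k] and the None test)
def pvNextNonblank : List String → Option String
  | [] => none
  | l :: rest => if pvBlankOrComment l then pvNextNonblank rest else some l

-- the inserted line: " "*(base+4) + "pass  # auto-rescue v3d: missing block\n"
def pvPassLine (base : Int) : String :=
  String.ofList (List.replicate (base + 4).toNat ' ' ++ "pass  # auto-rescue v3d: missing block\n".toList)

-- ensure_block_after's test: k is None or indent_of(lines[k]) <= base
def pvNeedsPass (tail : List String) (base : Int) : Bool :=
  match pvNextNonblank tail with
  | none => true
  | some l => pvIndentOf l ≤ base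

-- A's while-loop over (lines, i), as a zipper: positions < i are never read again, positions ≥ i
-- are the current suffix; ensure_block_after's insert at i+1 puts the pass line at the head of the
-- suffix, which the next iteration examines. Fuel only makes the loop total: 2*len+1 provably
-- suffices (an insert keeps len(lines)-i constant but the next line is never an opener).
def pvLoopA : Nat → List String → Bool → Bool
  | 0, _, changed => changed
  | _ + 1, [], changed => changed
  | fuel + 1, line :: tail, changed =>
    let s := PySem.Str.strip line
    if PySem.Str.endswith s ":" then
      if pvOpeners.contains (pvHead s) then
        if pvNeedsPass tail (pvIndentOf line) then
          pvLoopA fuel (pvPassLine (pvIndentOf line) :: tail) true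
        else pvLoopA fuel tail changed
      else pvLoopA fuel tail changed
    else pvLoopA fuel tail changed

def scan_and_fill_all_blocks (lines : List String) : Bool :=
  pvLoopA (2 * lines.length + 1) lines false

-- ===== PORT B =====
-- backward pass of Source B: nxt[j] = indent of first non-blank/non-comment line at index ≥ j (length n+1)
def pvNxtIndents : List String → List (Option Int)
  | [] => [none]
  | l :: rest =>
    let r := pvNxtIndents rest
    (if pvBlankOrComment l then r.headD none else some (pvIndentOf l)) :: r

-- Source B's per-line test: opener line whose next non-blank indent is absent or ≤ its own indent
def pvHitB (line : String) (nxt : Option Int) : Bool :=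
  let s := PySem.Str.strip line
  if PySem.Str.endswith s ":" then
    if pvOpeners.contains (pvHead s) then
      match nxt with
      | none => true
      | some k => k ≤ pvIndentOf line
    else false
  else false

-- forward pass (the rebuilt output list is write-only w.r.t. the returned Bool and is elided)
def pvGoB : List String → List (Option Int) → Bool → Bool
  | [], _, changed => changed
  | line :: rest, nxs, changed =>
    pvGoB rest (nxs.drop 1) (changed || pvHitB line ((nxs.drop 1).headD none))

def scan_and_fill_all_blocks_alt (lines : List String) : Bool :=
  pvGoB lines (pvNxtIndents lines) false

-- ===== PRECONDITION & SPEC =====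
def Spec_scan_and_fill_all_blocks (lines : List String) (out : Bool) : Prop := out = scan_and_fill_all_blocks_alt lines
instance (lines : List String) (out : Bool) : Decidable (Spec_scan_and_fill_all_blocks lines out) := by unfold Spec_scan_and_fill_all_blocks; infer_instance

-- ===== CLAIM (what is proved, stated in full; the proofs are below) =====
def Claim_equal_scan_and_fill_all_blocks : Prop := ∀ (lines : List String), Dom_scan_and_fill_all_blocks lines → Spec_scan_and_fill_all_blocks lines (scan_and_fill_all_blocks lines)

-- ===== LEMMAS AND PROOFS =====

-- head of B's table = indent of A's next_nonblank
theorem pvNxtIndents_head (tail : List String) :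
    (pvNxtIndents tail).headD none = (pvNextNonblank tail).map pvIndentOf := by
  induction tail with
  | nil => rfl
  | cons l rest ih =>
    simp only [pvNxtIndents, pvNextNonblank, List.headD_cons]
    cases h : pvBlankOrComment l with
    | true => rw [if_pos rfl, if_pos rfl, ih]
    | false => rw [if_neg (by simp), if_neg (by simp)]; rfl

-- leading spaces do not affect lstrip
theorem pvLstripRep (n : Nat) (P : List Char) :
    PySem.Chars.lstrip (List.replicate n ' ' ++ P) = PySem.Chars.lstrip P := by
  induction n with
  | zero => rfl
  | succ n ih => simpa [PySem.Chars.lstrip, List.replicate_succ] using ih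

-- the inserted pass line never ends with ':' after strip (so A's next iteration skips it)
theorem pvPassLine_inert (base : Int) :
    PySem.Str.endswith (PySem.Str.strip (pvPassLine base)) ":" = false := by
  have h : PySem.Chars.strip ((pvPassLine base).toList)
      = PySem.Chars.strip ("pass  # auto-rescue v3d: missing block\n".toList) := by
    have hl : (pvPassLine base).toList
        = List.replicate (base + 4).toNat ' ' ++ "pass  # auto-rescue v3d: missing block\n".toList := by
      simp [pvPassLine]
    rw [hl]; simp [PySem.Chars.strip, pvLstripRep]
  simp only [PySem.Str.endswith, PySem.Str.strip]
  simp [h]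
  decide

-- B's changed flag is absorbing
theorem pvGoB_true (rest : List String) : ∀ nxs, pvGoB rest nxs true = true := by
  induction rest with
  | nil => intro nxs; rfl
  | cons line tail ih => intro nxs; simp only [pvGoB, Bool.true_or]; apply ih

-- main correspondence: with enough fuel, A's in-place loop computes B's single pass
theorem pvLoopA_eq_goB (rest : List String) :
    ∀ (f : Nat) (c : Bool), 2 * rest.length + 1 ≤ f →
      pvLoopA f rest c = pvGoB rest (pvNxtIndents rest) c := by
  induction rest with
  | nil =>
    intro f c hf
    cases f with
    | zero => omega
    | succ f => rfl
  | cons line tail ih =>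
    intro f c hf
    cases f with
    | zero => simp only [List.length_cons] at hf; omega
    | succ f =>
      have hfuel : 2 * tail.length + 1 ≤ f := by
        simp only [List.length_cons] at hf; omega
      have hdrop : (pvNxtIndents (line :: tail)).drop 1 = pvNxtIndents tail := rfl
      simp only [pvLoopA, pvGoB, hdrop, pvNxtIndents_head]
      cases he : PySem.Str.endswith (PySem.Str.strip line) ":" with
      | false =>
        have hhit : pvHitB line ((pvNextNonblank tail).map pvIndentOf) = false := by
          simp only [pvHitB, he]; simp
        rw [if_neg (by simp), hhit, Bool.or_false]
        exact ih f c hfuel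
      | true =>
        cases hop : pvOpeners.contains (pvHead (PySem.Str.strip line)) with
        | false =>
          have hhit : pvHitB line ((pvNextNonblank tail).map pvIndentOf) = false := by
            simp only [pvHitB, he, hop]; simp
          rw [if_pos rfl, if_neg (by simp), hhit, Bool.or_false]
          exact ih f c hfuel
        | true =>
          cases hnp : pvNeedsPass tail (pvIndentOf line) with
          | false =>
            have hhit : pvHitB line ((pvNextNonblank tail).map pvIndentOf) = false := by
              simp only [pvHitB, he, hop]
              unfold pvNeedsPass at hnp
              cases h : pvNextNonblank tail with
              | none => rw [h] at hnp; simp at hnp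
              | some l => rw [h] at hnp; simp at hnp ⊢; exact hnp
            rw [if_pos rfl, if_pos rfl, if_neg (by simp), hhit, Bool.or_false]
            exact ih f c hfuel
          | true =>
            -- insert branch: the flag becomes true and stays true on both sides
            have hhit : pvHitB line ((pvNextNonblank tail).map pvIndentOf) = true := by
              simp only [pvHitB, he, hop]
              unfold pvNeedsPass at hnp
              cases h : pvNextNonblank tail with
              | none => simp
              | some l => rw [h] at hnp; simp at hnp ⊢; exact hnp
            rw [if_pos rfl, if_pos rfl, if_pos rfl, hhit, Bool.or_true, pvGoB_true]
            cases f with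
            | zero => simp only [List.length_cons] at hf; omega
            | succ f =>
              simp only [pvLoopA, pvPassLine_inert, Bool.false_eq_true, if_false]
              rw [ih f true (by simp only [List.length_cons] at hf; omega)]
              exact pvGoB_true tail _

-- ===== VERDICT (by name: the statement is the Claim_ definition above) =====
theorem scan_and_fill_all_blocks_spec : Claim_equal_scan_and_fill_all_blocks := by
  intro lines _
  unfold Spec_scan_and_fill_all_blocks scan_and_fill_all_blocks scan_and_fill_all_blocks_alt
  exact pvLoopA_eq_goB lines (2 * lines.length + 1) false (Nat.le_refl _)
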